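-- pv_equiv track=rewrite | github.com/angelala00/pbc_regulations | pbc_regulations/common/policy_entries.py | pick_best_path
-- ===== SOURCE A (Python) =====
-- from typing import Any, Dict, List, Optional, Sequence
--
-- def pick_best_path(documents: List[Dict[str, Any]]) -> Optional[str]:
--     if not documents:
--         return None
--     priority = {
--         "text": 5,
--         "txt": 5,
--         "pdf": 4,
--         "docx": 3,
--         "doc": 3,
--         "word": 3,
--         "html": 2,
--     }
--     ordered = sorted(
--         documents,
--         key=lambda doc: priority.get(str(doc.get("type", "")).lower(), 0),
--         reverse=True,
--     )
--     for doc in ordered: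
--         path_value = (
--             doc.get("local_path")
--             or doc.get("localPath")
--             or doc.get("path")
--         )
--         if path_value:
--             return path_value
--     return None
-- ===== SOURCE B (Python) =====
-- def pick_best_path(documents):
--     priority = {
--         "text": 5,
--         "txt": 5,
--         "pdf": 4,
--         "docx": 3,
--         "doc": 3,
--         "word": 3,
--         "html": 2,
--     }
--     best_priority = None
--     best_path = None
--     for doc in documents:
--         path = doc.get("local_path") or doc.get("localPath") or doc.get("path")
--         if path:
--             p = priority.get(str(doc.get("type", "")).lower(), 0)
--             if best_path is None or p > best_priority:
--                 best_priority = p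
--                 best_path = path
--     return best_path
-- ===== Notes on version B (the rewrite author's own statement) =====
-- stated objective: simpler
-- what changed: Replaces A's full stable descending sort followed by a first-truthy-path scan with a single linear pass that tracks the best (priority, path) seen so far, using strict '>' to preserve the stable sort's earliest-index tie-break.
import Mathlib
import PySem

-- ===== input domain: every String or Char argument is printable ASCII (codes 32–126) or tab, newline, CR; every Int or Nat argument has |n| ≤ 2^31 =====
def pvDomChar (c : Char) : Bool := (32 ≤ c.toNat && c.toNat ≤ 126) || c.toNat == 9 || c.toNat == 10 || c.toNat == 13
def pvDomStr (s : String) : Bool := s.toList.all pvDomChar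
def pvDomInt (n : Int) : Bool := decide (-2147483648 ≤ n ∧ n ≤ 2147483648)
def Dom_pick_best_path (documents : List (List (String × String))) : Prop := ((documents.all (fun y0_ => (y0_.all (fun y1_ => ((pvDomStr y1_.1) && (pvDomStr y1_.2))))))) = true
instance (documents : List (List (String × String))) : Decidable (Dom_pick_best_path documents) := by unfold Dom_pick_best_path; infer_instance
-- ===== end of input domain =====

-- B replaces A's sort-then-scan with a single max-tracking pass (strict '>' keeps A's stable-sort tie-break);
-- equivalence of the RETURN value is what is proved.

-- ===== PORT A =====
-- shared leaf helpers (both Pythons contain these exact expressions)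
def pvPrio : PySem.Dict String Int :=
  PySem.Dict.ofList [("text", 5), ("txt", 5), ("pdf", 4), ("docx", 3), ("doc", 3), ("word", 3), ("html", 2)]

-- doc.get(k) on a Python dict passed as an association list
def pvGet (doc : List (String × String)) (k : String) : Option String :=
  (PySem.Dict.mk doc).get? k

-- priority.get(str(doc.get("type", "")).lower(), 0)
def pvKey (doc : List (String × String)) : Int :=
  pvPrio.getD (PySem.Str.lower ((PySem.Dict.mk doc).getD "type" "")) 0

-- Python 'a or b' on two Optional[str] values
def pvOr (a b : Option String) : Option String :=
  match a with
  | some s => if s == "" then b else some s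
  | none => b

-- truthiness of an Optional[str]
def pvTruthy (o : Option String) : Bool :=
  match o with
  | some s => !(s == "")
  | none => false

-- doc.get("local_path") or doc.get("localPath") or doc.get("path")
def pvPathOf (doc : List (String × String)) : Option String :=
  pvOr (pvGet doc "local_path") (pvOr (pvGet doc "localPath") (pvGet doc "path"))

-- A's 'for doc in ordered: … return path_value' loop
def pvScanA : List (List (String × String)) → Option String
  | [] => none
  | d :: ds =>
    let path_value := pvPathOf d
    if pvTruthy path_value then path_value else pvScanA ds

def pick_best_path (documents : List (List (String × String))) : Option String :=
  if documents = [] then none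
  else pvScanA (PySem.List.sorted documents pvKey true)

-- ===== PORT B =====
-- one step of B's loop body: state = (best_priority, best_path) when best_path is not None
def pvUpd (st : Option (Int × String)) (doc : List (String × String)) : Option (Int × String) :=
  match pvPathOf doc with
  | some s =>
    if s == "" then st
    else
      let p := pvKey doc
      match st with
      | none => some (p, s)
      | some (bp, _) => if p > bp then some (p, s) else st
  | none => st

def pick_best_path_alt (documents : List (List (String × String))) : Option String :=
  (documents.foldl pvUpd none).map (·.2)

-- ===== PRECONDITION & SPEC =====
def Spec_pick_best_path (documents : List (List (String × String))) (out : Option String) : Prop := out = pick_best_path_alt documents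
instance (documents : List (List (String × String))) (out : Option String) : Decidable (Spec_pick_best_path documents out) := by unfold Spec_pick_best_path; infer_instance

-- ===== CLAIM (what is proved, stated in full; the proofs are below) =====
def Claim_equal_pick_best_path : Prop := ∀ (documents : List (List (String × String))), Dom_pick_best_path documents → Spec_pick_best_path documents (pick_best_path documents)

-- ===== LEMMAS AND PROOFS =====

-- first (priority, truthy path) of a list, in order: abstracts A's scan
def pvG : List (List (String × String)) → Option (Int × String)
  | [] => none
  | d :: ds =>
    match pvPathOf d with
    | some s => if s == "" then pvG ds else some (pvKey d, s)
    | none => pvG ds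

theorem pvScanA_eq_pvG (acc : List (List (String × String))) :
    pvScanA acc = (pvG acc).map (·.2) := by
  induction acc with
  | nil => rfl
  | cons d ds ih =>
    simp only [pvScanA, pvG]
    cases h : pvPathOf d with
    | none => simpa [pvTruthy] using ih
    | some s =>
      by_cases hs : s = ""
      · simpa [pvTruthy, hs] using ih
      · simp [pvTruthy, hs]

theorem pvG_key_le {acc : List (List (String × String))} {K p : Int} {s : String}
    (hb : ∀ z ∈ acc, pvKey z ≤ K) (hg : pvG acc = some (p, s)) : p ≤ K := by
  induction acc with
  | nil => simp [pvG] at hg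
  | cons d ds ih =>
    have hb' : ∀ z ∈ ds, pvKey z ≤ K := fun z hz => hb z (List.mem_cons_of_mem _ hz)
    cases h : pvPathOf d with
    | none => exact ih hb' (by simpa [pvG, h] using hg)
    | some t =>
      by_cases ht : t = ""
      · exact ih hb' (by simpa [pvG, h, ht] using hg)
      · have hk : pvKey d = p := by
          have := hg
          simp [pvG, h, ht] at this
          exact this.1
        exact hk ▸ hb d List.mem_cons_self

theorem pvG_insertBy (x : List (String × String)) (acc : List (List (String × String)))
    (hp : acc.Pairwise (fun a b => pvKey b ≤ pvKey a)) :
    pvG (PySem.List.insertBy (fun a b => decide (pvKey b < pvKey a)) x acc) = pvUpd (pvG acc) x := by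
  induction acc with
  | nil =>
    cases hpx : pvPathOf x with
    | none => simp [PySem.List.insertBy, pvG, pvUpd, hpx]
    | some s =>
      by_cases hs : s = "" <;> simp [PySem.List.insertBy, pvG, pvUpd, hpx, hs]
  | cons y ys ih =>
    rw [List.pairwise_cons] at hp
    obtain ⟨hy, hys⟩ := hp
    by_cases hlt : pvKey y < pvKey x
    · rw [show PySem.List.insertBy (fun a b => decide (pvKey b < pvKey a)) x (y :: ys)
            = x :: y :: ys by simp [PySem.List.insertBy, hlt]]
      cases hpx : pvPathOf x with
      | none => simp [pvG, pvUpd, hpx]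
      | some s =>
        by_cases hs : s = ""
        · simp [pvG, pvUpd, hpx, hs]
        · cases hgy : pvG (y :: ys) with
          | none => simp [pvG, pvUpd, hpx, hs]
          | some pt =>
            obtain ⟨p, t⟩ := pt
            have hb : ∀ z ∈ y :: ys, pvKey z ≤ pvKey y := by
              intro z hz
              rcases List.mem_cons.mp hz with h | h
              · exact h ▸ le_refl _
              · exact hy z h
            have hpK : p ≤ pvKey y := pvG_key_le hb hgy
            have : p < pvKey x := lt_of_le_of_lt hpK hlt
            simp [pvG, pvUpd, hpx, hs, this]
    · rw [show PySem.List.insertBy (fun a b => decide (pvKey b < pvKey a)) x (y :: ys)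
            = y :: PySem.List.insertBy (fun a b => decide (pvKey b < pvKey a)) x ys by
          simp [PySem.List.insertBy, hlt]]
      cases hpy : pvPathOf y with
      | none => simpa [pvG, pvUpd, hpy] using ih hys
      | some t =>
        by_cases hty : t = ""
        · simpa [pvG, pvUpd, hpy, hty] using ih hys
        · cases hpx : pvPathOf x with
          | none => simp [pvG, pvUpd, hpy, hty, hpx]
          | some s =>
            by_cases hs : s = ""
            · simp [pvG, pvUpd, hpy, hty, hpx, hs]
            · have : ¬ (pvKey y < pvKey x) := hlt
              simp [pvG, pvUpd, hpy, hty, hpx, hs, this]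

theorem pvG_sorted (docs : List (List (String × String))) :
    pvG (PySem.List.sorted docs pvKey true) = docs.foldl pvUpd none := by
  induction docs using List.reverseRecOn with
  | nil => rfl
  | append_singleton ds x ih =>
    rw [PySem.List.sorted_rev_eq_foldl_insertBy, List.foldl_append, List.foldl_cons,
        List.foldl_nil, ← PySem.List.sorted_rev_eq_foldl_insertBy,
        pvG_insertBy x _ (PySem.List.sorted_pairwise_rev ds pvKey), ih,
        List.foldl_append, List.foldl_cons, List.foldl_nil]

-- ===== VERDICT (by name: the statement is the Claim_ definition above) =====
theorem pick_best_path_spec : Claim_equal_pick_best_path := by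
  intro docs _
  unfold Spec_pick_best_path pick_best_path pick_best_path_alt
  by_cases h : docs = []
  · subst h; rfl
  · rw [if_neg h, pvScanA_eq_pvG, pvG_sorted]
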